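-- pv_equiv track=rewrite | github.com/allenai/open-instruct | download_evals_analyze_lengths/fetch_predictions_by_experiment.py | sanitize_json_line
-- ===== SOURCE A (Python) =====
-- def sanitize_json_line(line: str) -> str:
--     """Replace NaN/Infinity placeholders with JSON-safe values."""
--     replacements = {
--         ": NaN": ": null",
--         ":NaN": ":null",
--         ": Infinity": ": null",
--         ":Infinity": ":null",
--         ":-Infinity": ":null",
--         ": -Infinity": ": null",
--     }
--     for needle, replacement in replacements.items():
--         if needle in line:
--             line = line.replace(needle, replacement)
--     return line
-- ===== SOURCE B (Python) =====
-- def sanitize_json_line(line: str) -> str: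
--     """Replace NaN/Infinity placeholders with JSON-safe values in ONE pass."""
--     out = []
--     i = 0
--     n = len(line)
--     while i < n:
--         if line[i] == ':':
--             j = i + 1
--             sp = j < n and line[j] == ' '
--             if sp:
--                 j += 1
--             if line.startswith('NaN', j):
--                 out.append(': null' if sp else ':null')
--                 i = j + 3
--                 continue
--             k = j + 1 if j < n and line[j] == '-' else j
--             if line.startswith('Infinity', k):
--                 out.append(': null' if sp else ':null')
--                 i = k + 8
--                 continue
--         out.append(line[i])
--         i += 1
--     return ''.join(out)
-- ===== Notes on version B (the rewrite author's own statement) =====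
-- stated objective: alternative
-- what changed: B replaces A's six sequential full-string str.replace passes (one per needle) with a single left-to-right scan that, at each colon, skips an optional space and an optional minus, matches the NaN or Infinity token directly, and emits the null replacement in one pass.
import Mathlib
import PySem

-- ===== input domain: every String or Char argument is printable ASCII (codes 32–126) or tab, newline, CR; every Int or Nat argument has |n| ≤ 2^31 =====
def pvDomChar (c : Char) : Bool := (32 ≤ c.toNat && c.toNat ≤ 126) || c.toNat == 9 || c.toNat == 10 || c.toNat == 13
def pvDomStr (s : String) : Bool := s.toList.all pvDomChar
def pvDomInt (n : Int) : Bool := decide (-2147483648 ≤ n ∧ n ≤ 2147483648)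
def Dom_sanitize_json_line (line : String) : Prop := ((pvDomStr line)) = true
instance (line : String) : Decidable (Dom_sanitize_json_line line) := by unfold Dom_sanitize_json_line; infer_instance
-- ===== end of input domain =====

-- B replaces A's six full-string `str.replace` passes by ONE left-to-right scan that
-- rewrites `:[ ]?NaN` and `:[ ]?-?Infinity` to `:[ ]?null` in a single pass (objective: alternative single-pass algorithm).

-- ===== PORT A =====
-- A's `replacements` dict, in insertion order.
def pvTable : List (String × String) :=
  [(": NaN", ": null"), (":NaN", ":null"), (": Infinity", ": null"),
   (":Infinity", ":null"), (":-Infinity", ":null"), (": -Infinity", ": null")]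

-- the `for needle, replacement in replacements.items(): if needle in line: line = line.replace(...)` loop
def sanitize_json_line (line : String) : String :=
  pvTable.foldl (fun s nr => if PySem.Str.isIn nr.1 s then PySem.Str.replace s nr.1 nr.2 else s) line

-- ===== PORT B =====
-- Source B's one-pass scanner over the characters: at a ':', skip an optional space (sp),
-- try 'NaN', else skip an optional '-' and try 'Infinity'; emit ': null'/' :null' and jump, else copy the char.
def pvNaN : List Char := ['N', 'a', 'N']
def pvInf : List Char := ['I', 'n', 'f', 'i', 'n', 'i', 't', 'y']

def sanB : List Char → List Char
  | [] => []
  | c :: t =>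
    if c = ':' then
      -- sp = (next char is a space); r = rest after the optional space (Source B's j)
      let sp : Bool := t.head? = some ' '
      let r : List Char := if sp then t.tail else t
      if pvNaN.isPrefixOf r then
        (if sp then [':', ' ', 'n', 'u', 'l', 'l'] else [':', 'n', 'u', 'l', 'l']) ++ sanB (r.drop 3)
      else
        -- r2 = rest after the optional '-' (Source B's k)
        let r2 : List Char := if r.head? = some '-' then r.tail else r
        if pvInf.isPrefixOf r2 then
          (if sp then [':', ' ', 'n', 'u', 'l', 'l'] else [':', 'n', 'u', 'l', 'l']) ++ sanB (r2.drop 8)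
        else c :: sanB t
    else c :: sanB t
termination_by l => l.length
decreasing_by
  all_goals simp only [List.length_cons, List.length_drop]
  all_goals (try (split <;> try split))
  all_goals (simp [List.length_tail]; try omega)

def sanitize_json_line_alt (line : String) : String := String.ofList (sanB line.toList)

-- ===== PRECONDITION & SPEC =====
def Spec_sanitize_json_line (line : String) (out : String) : Prop := out = sanitize_json_line_alt line
instance (line : String) (out : String) : Decidable (Spec_sanitize_json_line line out) := by unfold Spec_sanitize_json_line; infer_instance

-- ===== CLAIM (what is proved, stated in full; the proofs are below) =====
def Claim_equal_sanitize_json_line : Prop := ∀ (line : String), Dom_sanitize_json_line line → Spec_sanitize_json_line line (sanitize_json_line line)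

-- ===== LEMMAS AND PROOFS =====

-- A structural (fuel-free) presentation of Python's str.replace (leftmost, non-overlapping).
def repl (old new : List Char) : List Char → List Char
  | [] => []
  | c :: t =>
    if old.isPrefixOf (c :: t) then new ++ repl old new (t.drop (old.length - 1))
    else c :: repl old new t
termination_by l => l.length
decreasing_by all_goals (simp [List.length_drop]; try omega)

lemma go_eq_repl (old new : List Char) (hold : old ≠ []) :
    ∀ fuel (l acc : List Char), l.length ≤ fuel →
      PySem.Chars.replace.go old new fuel l acc = acc.reverse ++ repl old new l := by
  intro fuel
  induction fuel with
  | zero =>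
    intro l acc hl
    have : l = [] := List.eq_nil_of_length_eq_zero (Nat.le_zero.mp hl)
    subst this
    simp [PySem.Chars.replace.go, repl]
  | succ n ih =>
    intro l acc hl
    cases l with
    | nil => simp [PySem.Chars.replace.go, repl]
    | cons c t =>
      rw [PySem.Chars.replace.go]
      by_cases hp : old.isPrefixOf (c :: t)
      · rw [if_pos hp]
        obtain ⟨a, p', rfl⟩ : ∃ a p', old = a :: p' := by
          cases old with
          | nil => exact absurd rfl hold
          | cons a p' => exact ⟨a, p', rfl⟩
        have hdrop : List.drop (a :: p').length (c :: t) = t.drop ((a :: p').length - 1) := by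
          simp
        rw [hdrop, ih _ _ (by simp at hl ⊢; omega)]
        rw [repl, if_pos hp]
        simp
      · rw [if_neg hp, ih _ _ (by simp at hl ⊢; omega)]
        rw [repl, if_neg hp]
        simp

lemma replace_eq_repl (s old new : List Char) (hold : old ≠ []) :
    PySem.Chars.replace s old new = repl old new s := by
  rw [PySem.Chars.replace, if_neg (by simpa [List.isEmpty_iff] using hold)]
  simpa using go_eq_repl old new hold s.length s [] le_rfl

lemma repl_no_occ (old new : List Char) : ∀ l, ¬ (old <:+: l) → repl old new l = l := by
  intro l
  induction l with
  | nil => intro _; simp [repl]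
  | cons c t ih =>
    intro h
    rw [repl, if_neg (fun hp => h ((List.isPrefixOf_iff_prefix.mp hp).isInfix)),
      ih (fun hi => h (hi.trans (List.suffix_cons c t).isInfix))]

lemma gstep_eq_repl (l old new : List Char) (hold : old ≠ []) :
    (if PySem.Chars.isIn old l then PySem.Chars.replace l old new else l) = repl old new l := by
  by_cases h : PySem.Chars.isIn old l
  · rw [if_pos h, replace_eq_repl _ _ _ hold]
  · rw [if_neg h]
    refine (repl_no_occ old new l ?_).symm
    have hfind : PySem.Chars.find l old = -1 := by
      simpa [PySem.Chars.isIn] using h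
    have := (PySem.Chars.findFrom_natCast_eq_neg_one_iff l old 0 (Nat.zero_le _))
    simp only [Nat.cast_zero, PySem.Chars.findFrom_zero, List.drop_zero] at this
    exact this.mp hfind

-- X can be peeled past repl p r: no suffix of X can start a match of p (decidable for literals).
def okPeel (X p : List Char) : Prop := ∀ i < X.length, ¬ (X.drop i <+: p) ∧ ¬ (p <+: X.drop i)

lemma repl_dist (p r X : List Char) (hX : okPeel X p) :
    ∀ t, repl p r (X ++ t) = X ++ repl p r t := by
  induction X with
  | nil => intro t; rfl
  | cons c X' ih =>
    intro t
    have h0 := hX 0 (by simp)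
    have hnp : ¬ p.isPrefixOf (c :: (X' ++ t)) := by
      intro hp
      have hp' := List.isPrefixOf_iff_prefix.mp hp
      have hXpre : (c :: X') <+: (c :: X') ++ t := List.prefix_append _ _
      rcases List.prefix_or_prefix_of_prefix hp' hXpre with h | h
      · exact h0.2 h
      · exact h0.1 h
    rw [List.cons_append, repl, if_neg hnp, ih (fun i hi => hX (i + 1) (by simp; omega)) t]
    simp

lemma repl_match (p r : List Char) (hp : p ≠ []) :
    ∀ t, repl p r (p ++ t) = r ++ repl p r t := by
  intro t
  obtain ⟨a, p', rfl⟩ : ∃ a p', p = a :: p' := by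
    cases p with
    | nil => exact absurd rfl hp
    | cons a p' => exact ⟨a, p', rfl⟩
  rw [List.cons_append, repl,
    if_pos (List.isPrefixOf_iff_prefix.mpr
      (show (a :: p') <+: (a :: (p' ++ t)) by simpa using List.prefix_append (a :: p') t))]
  congr 1
  have : (p' ++ t).drop ((a :: p').length - 1) = t := by
    simpa using List.drop_left (l₁ := p') (l₂ := t)
  rw [this]

-- a step of A's guarded loop, moved to char lists
lemma step_eq (s old new : String) (hold : old.toList ≠ []) :
    ((if PySem.Str.isIn old s then PySem.Str.replace s old new else s)).toList
      = repl old.toList new.toList s.toList := by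
  rw [apply_ite String.toList, PySem.Str.toList_replace, PySem.Str.isIn]
  exact gstep_eq_repl s.toList old.toList new.toList hold

lemma repl_cons_of_not_pre (p r : List Char) (c : Char) (t : List Char)
    (h : ¬ p <+: (c :: t)) : repl p r (c :: t) = c :: repl p r t := by
  rw [repl, if_neg (fun hb => h (List.isPrefixOf_iff_prefix.mp hb))]

-- a replace whose needle and replacement both start with ':' cannot create or destroy a
-- colon-free prefix
lemma repl_prefix_iff (p r : List Char) (hp : p.head? = some ':') (hr : r.head? = some ':') :
    ∀ (u q : List Char), ':' ∉ q → ((q <+: repl p r u) ↔ (q <+: u))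
  | [], q => by intro _; rw [repl]
  | c :: t, q => by
    intro hq
    by_cases hm : p.isPrefixOf (c :: t)
    · rw [repl, if_pos hm]
      obtain ⟨p', hp'⟩ : ∃ p', p = ':' :: p' := by
        cases p with
        | nil => simp at hp
        | cons a p' => simp at hp; exact ⟨p', by rw [hp]⟩
      have hc : c = ':' := by
        have := List.isPrefixOf_iff_prefix.mp hm
        rw [hp'] at this
        exact (List.cons_prefix_cons.mp this).1.symm
      obtain ⟨r', hr'⟩ : ∃ r', r = ':' :: r' := by
        cases r with
        | nil => simp at hr
        | cons a r' => simp at hr; exact ⟨r', by rw [hr]⟩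
      cases q with
      | nil => simp
      | cons b q' =>
        constructor
        · intro h
          rw [hr', List.cons_append] at h
          have : b = ':' := (List.cons_prefix_cons.mp h).1
          exact absurd (this ▸ List.mem_cons_self) hq
        · intro h
          rw [hc] at h
          have : b = ':' := (List.cons_prefix_cons.mp h).1
          exact absurd (this ▸ List.mem_cons_self) hq
    · rw [repl, if_neg hm]
      cases q with
      | nil => simp
      | cons b q' =>
        rw [List.cons_prefix_cons, List.cons_prefix_cons,
          repl_prefix_iff p r hp hr t q' (fun h => hq (List.mem_cons_of_mem b h))]
termination_by u _ => u.length
decreasing_by simp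

-- the six needles / replacements as char lists
def pvN1 : List Char := [':', ' ', 'N', 'a', 'N']
def pvN2 : List Char := [':', 'N', 'a', 'N']
def pvN3 : List Char := [':', ' ', 'I', 'n', 'f', 'i', 'n', 'i', 't', 'y']
def pvN4 : List Char := [':', 'I', 'n', 'f', 'i', 'n', 'i', 't', 'y']
def pvN5 : List Char := [':', '-', 'I', 'n', 'f', 'i', 'n', 'i', 't', 'y']
def pvN6 : List Char := [':', ' ', '-', 'I', 'n', 'f', 'i', 'n', 'i', 't', 'y']
def pvRS : List Char := [':', ' ', 'n', 'u', 'l', 'l']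
def pvR0 : List Char := [':', 'n', 'u', 'l', 'l']

-- the composite of A's six replaces, on char lists
def pvRA (cs : List Char) : List Char :=
  repl pvN6 pvRS (repl pvN5 pvR0 (repl pvN4 pvR0 (repl pvN3 pvRS (repl pvN2 pvR0 (repl pvN1 pvRS cs)))))

lemma A_eq_pvRA (line : String) :
    (sanitize_json_line line).toList = pvRA line.toList := by
  unfold sanitize_json_line pvTable
  simp only [List.foldl_cons, List.foldl_nil]
  rw [step_eq _ _ _ (by decide), step_eq _ _ _ (by decide), step_eq _ _ _ (by decide),
    step_eq _ _ _ (by decide), step_eq _ _ _ (by decide), step_eq _ _ _ (by decide)]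
  rfl

-- the composite on a matched needle: earlier replaces peel past it, later ones past its replacement
lemma pvRA_m1 (v : List Char) : pvRA (pvN1 ++ v) = pvRS ++ pvRA v := by
  unfold pvRA
  rw [repl_match pvN1 pvRS (by decide) v,
      repl_dist pvN2 pvR0 pvRS (by unfold okPeel; decide),
      repl_dist pvN3 pvRS pvRS (by unfold okPeel; decide),
      repl_dist pvN4 pvR0 pvRS (by unfold okPeel; decide),
      repl_dist pvN5 pvR0 pvRS (by unfold okPeel; decide),
      repl_dist pvN6 pvRS pvRS (by unfold okPeel; decide)]

lemma pvRA_m2 (v : List Char) : pvRA (pvN2 ++ v) = pvR0 ++ pvRA v := by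
  unfold pvRA
  rw [repl_dist pvN1 pvRS pvN2 (by unfold okPeel; decide),
      repl_match pvN2 pvR0 (by decide),
      repl_dist pvN3 pvRS pvR0 (by unfold okPeel; decide),
      repl_dist pvN4 pvR0 pvR0 (by unfold okPeel; decide),
      repl_dist pvN5 pvR0 pvR0 (by unfold okPeel; decide),
      repl_dist pvN6 pvRS pvR0 (by unfold okPeel; decide)]

lemma pvRA_m3 (v : List Char) : pvRA (pvN3 ++ v) = pvRS ++ pvRA v := by
  unfold pvRA
  rw [repl_dist pvN1 pvRS pvN3 (by unfold okPeel; decide),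
      repl_dist pvN2 pvR0 pvN3 (by unfold okPeel; decide),
      repl_match pvN3 pvRS (by decide),
      repl_dist pvN4 pvR0 pvRS (by unfold okPeel; decide),
      repl_dist pvN5 pvR0 pvRS (by unfold okPeel; decide),
      repl_dist pvN6 pvRS pvRS (by unfold okPeel; decide)]

lemma pvRA_m4 (v : List Char) : pvRA (pvN4 ++ v) = pvR0 ++ pvRA v := by
  unfold pvRA
  rw [repl_dist pvN1 pvRS pvN4 (by unfold okPeel; decide),
      repl_dist pvN2 pvR0 pvN4 (by unfold okPeel; decide),
      repl_dist pvN3 pvRS pvN4 (by unfold okPeel; decide),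
      repl_match pvN4 pvR0 (by decide),
      repl_dist pvN5 pvR0 pvR0 (by unfold okPeel; decide),
      repl_dist pvN6 pvRS pvR0 (by unfold okPeel; decide)]

lemma pvRA_m5 (v : List Char) : pvRA (pvN5 ++ v) = pvR0 ++ pvRA v := by
  unfold pvRA
  rw [repl_dist pvN1 pvRS pvN5 (by unfold okPeel; decide),
      repl_dist pvN2 pvR0 pvN5 (by unfold okPeel; decide),
      repl_dist pvN3 pvRS pvN5 (by unfold okPeel; decide),
      repl_dist pvN4 pvR0 pvN5 (by unfold okPeel; decide),
      repl_match pvN5 pvR0 (by decide),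
      repl_dist pvN6 pvRS pvR0 (by unfold okPeel; decide)]

lemma pvRA_m6 (v : List Char) : pvRA (pvN6 ++ v) = pvRS ++ pvRA v := by
  unfold pvRA
  rw [repl_dist pvN1 pvRS pvN6 (by unfold okPeel; decide),
      repl_dist pvN2 pvR0 pvN6 (by unfold okPeel; decide),
      repl_dist pvN3 pvRS pvN6 (by unfold okPeel; decide),
      repl_dist pvN4 pvR0 pvN6 (by unfold okPeel; decide),
      repl_dist pvN5 pvR0 pvN6 (by unfold okPeel; decide),
      repl_match pvN6 pvRS (by decide)]

lemma not_pre_of_head (p : List Char) (hp : p.head? = some ':') (c : Char) (t : List Char)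
    (hc : c ≠ ':') : ¬ p <+: (c :: t) := by
  cases p with
  | nil => simp at hp
  | cons a p' =>
    intro h
    simp only [List.head?_cons, Option.some.injEq] at hp
    exact hc ((hp ▸ (List.cons_prefix_cons.mp h).1).symm)

lemma pvRA_cons_ne (c : Char) (t : List Char) (hc : c ≠ ':') :
    pvRA (c :: t) = c :: pvRA t := by
  unfold pvRA
  rw [repl_cons_of_not_pre pvN1 pvRS c _ (not_pre_of_head pvN1 (by decide) c _ hc),
      repl_cons_of_not_pre pvN2 pvR0 c _ (not_pre_of_head pvN2 (by decide) c _ hc),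
      repl_cons_of_not_pre pvN3 pvRS c _ (not_pre_of_head pvN3 (by decide) c _ hc),
      repl_cons_of_not_pre pvN4 pvR0 c _ (not_pre_of_head pvN4 (by decide) c _ hc),
      repl_cons_of_not_pre pvN5 pvR0 c _ (not_pre_of_head pvN5 (by decide) c _ hc),
      repl_cons_of_not_pre pvN6 pvRS c _ (not_pre_of_head pvN6 (by decide) c _ hc)]

lemma pvRA_cons_colon (t : List Char)
    (h1 : ¬ pvN1 <+: (':' :: t)) (h2 : ¬ pvN2 <+: (':' :: t)) (h3 : ¬ pvN3 <+: (':' :: t))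
    (h4 : ¬ pvN4 <+: (':' :: t)) (h5 : ¬ pvN5 <+: (':' :: t)) (h6 : ¬ pvN6 <+: (':' :: t)) :
    pvRA (':' :: t) = ':' :: pvRA t := by
  have L1 : ∀ q : List Char, ':' ∉ q → ((q <+: repl pvN1 pvRS t) ↔ q <+: t) :=
    fun q hq => repl_prefix_iff pvN1 pvRS (by decide) (by decide) t q hq
  have L2 : ∀ q : List Char, ':' ∉ q →
      ((q <+: repl pvN2 pvR0 (repl pvN1 pvRS t)) ↔ q <+: t) :=
    fun q hq => (repl_prefix_iff pvN2 pvR0 (by decide) (by decide) _ q hq).trans (L1 q hq)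
  have L3 : ∀ q : List Char, ':' ∉ q →
      ((q <+: repl pvN3 pvRS (repl pvN2 pvR0 (repl pvN1 pvRS t))) ↔ q <+: t) :=
    fun q hq => (repl_prefix_iff pvN3 pvRS (by decide) (by decide) _ q hq).trans (L2 q hq)
  have L4 : ∀ q : List Char, ':' ∉ q →
      ((q <+: repl pvN4 pvR0 (repl pvN3 pvRS (repl pvN2 pvR0 (repl pvN1 pvRS t)))) ↔ q <+: t) :=
    fun q hq => (repl_prefix_iff pvN4 pvR0 (by decide) (by decide) _ q hq).trans (L3 q hq)
  have L5 : ∀ q : List Char, ':' ∉ q →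
      ((q <+: repl pvN5 pvR0 (repl pvN4 pvR0 (repl pvN3 pvRS (repl pvN2 pvR0 (repl pvN1 pvRS t))))) ↔ q <+: t) :=
    fun q hq => (repl_prefix_iff pvN5 pvR0 (by decide) (by decide) _ q hq).trans (L4 q hq)
  have n2 : ¬ pvN2 <+: (':' :: repl pvN1 pvRS t) := by
    intro h
    apply h2
    rw [show pvN2 = ':' :: ['N', 'a', 'N'] from rfl, List.cons_prefix_cons] at h ⊢
    exact ⟨rfl, (L1 _ (by decide)).mp h.2⟩
  have n3 : ¬ pvN3 <+: (':' :: repl pvN2 pvR0 (repl pvN1 pvRS t)) := by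
    intro h
    apply h3
    rw [show pvN3 = ':' :: [' ', 'I', 'n', 'f', 'i', 'n', 'i', 't', 'y'] from rfl,
      List.cons_prefix_cons] at h ⊢
    exact ⟨rfl, (L2 _ (by decide)).mp h.2⟩
  have n4 : ¬ pvN4 <+: (':' :: repl pvN3 pvRS (repl pvN2 pvR0 (repl pvN1 pvRS t))) := by
    intro h
    apply h4
    rw [show pvN4 = ':' :: ['I', 'n', 'f', 'i', 'n', 'i', 't', 'y'] from rfl,
      List.cons_prefix_cons] at h ⊢
    exact ⟨rfl, (L3 _ (by decide)).mp h.2⟩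
  have n5 : ¬ pvN5 <+: (':' :: repl pvN4 pvR0 (repl pvN3 pvRS (repl pvN2 pvR0 (repl pvN1 pvRS t)))) := by
    intro h
    apply h5
    rw [show pvN5 = ':' :: ['-', 'I', 'n', 'f', 'i', 'n', 'i', 't', 'y'] from rfl,
      List.cons_prefix_cons] at h ⊢
    exact ⟨rfl, (L4 _ (by decide)).mp h.2⟩
  have n6 : ¬ pvN6 <+: (':' :: repl pvN5 pvR0 (repl pvN4 pvR0 (repl pvN3 pvRS (repl pvN2 pvR0 (repl pvN1 pvRS t))))) := by
    intro h
    apply h6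
    rw [show pvN6 = ':' :: [' ', '-', 'I', 'n', 'f', 'i', 'n', 'i', 't', 'y'] from rfl,
      List.cons_prefix_cons] at h ⊢
    exact ⟨rfl, (L5 _ (by decide)).mp h.2⟩
  unfold pvRA
  rw [repl_cons_of_not_pre pvN1 pvRS ':' _ h1,
      repl_cons_of_not_pre pvN2 pvR0 ':' _ n2,
      repl_cons_of_not_pre pvN3 pvRS ':' _ n3,
      repl_cons_of_not_pre pvN4 pvR0 ':' _ n4,
      repl_cons_of_not_pre pvN5 pvR0 ':' _ n5,
      repl_cons_of_not_pre pvN6 pvRS ':' _ n6]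

-- main: the composite of six replaces is the one-pass scan
lemma pvRA_eq_sanB : ∀ cs : List Char, pvRA cs = sanB cs
  | [] => by
    unfold pvRA
    rw [repl, repl, repl, repl, repl, repl, sanB]
  | c :: t => by
    by_cases hc : c = ':'
    · subst hc
      rcases t with _ | ⟨d, u⟩
      · -- ":"
        rw [pvRA_cons_colon [] (by decide) (by decide) (by decide) (by decide) (by decide)
          (by decide), pvRA_eq_sanB []]
        conv_rhs => rw [sanB]
        simp [pvNaN, pvInf]
      · by_cases hd : d = ' '
        · subst hd
          by_cases hN : pvNaN.isPrefixOf u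
          · obtain ⟨v, hv⟩ := List.isPrefixOf_iff_prefix.mp hN
            subst hv
            have hA : pvRA (':' :: ' ' :: (pvNaN ++ v)) = pvRS ++ pvRA v := pvRA_m1 v
            rw [hA, pvRA_eq_sanB v]
            conv_rhs => rw [sanB]
            simp [pvNaN, pvRS, List.isPrefixOf_iff_prefix]
          · rcases u with _ | ⟨e, w⟩
            · -- ": "
              rw [pvRA_cons_colon [' '] (by decide) (by decide) (by decide) (by decide)
                (by decide) (by decide), pvRA_eq_sanB [' ']]
              conv_rhs => rw [sanB]
              simp [pvNaN, pvInf]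
            · by_cases he : e = '-'
              · subst he
                by_cases hI : pvInf.isPrefixOf w
                · obtain ⟨v, hv⟩ := List.isPrefixOf_iff_prefix.mp hI
                  subst hv
                  have hA : pvRA (':' :: ' ' :: '-' :: (pvInf ++ v)) = pvRS ++ pvRA v := pvRA_m6 v
                  rw [hA, pvRA_eq_sanB v]
                  conv_rhs => rw [sanB]
                  simp [pvNaN, pvInf, pvRS, List.isPrefixOf_iff_prefix]
                · rw [pvRA_cons_colon (' ' :: '-' :: w)
                    (by simp_all [pvN1, pvN2, pvN3, pvN4, pvN5, pvN6, pvNaN, pvInf, List.cons_prefix_cons, List.isPrefixOf_iff_prefix] <;> first | assumption | (intro h; subst h; simp_all) | skip) (by simp_all [pvN1, pvN2, pvN3, pvN4, pvN5, pvN6, pvNaN, pvInf, List.cons_prefix_cons, List.isPrefixOf_iff_prefix] <;> first | assumption | (intro h; subst h; simp_all) | skip) (by simp_all [pvN1, pvN2, pvN3, pvN4, pvN5, pvN6, pvNaN, pvInf, List.cons_prefix_cons, List.isPrefixOf_iff_prefix] <;> first | assumption | (intro h; subst h; simp_all) | skip) (by simp_all [pvN1, pvN2, pvN3, pvN4, pvN5,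 pvN6, pvNaN, pvInf, List.cons_prefix_cons, List.isPrefixOf_iff_prefix] <;> first | assumption | (intro h; subst h; simp_all) | skip) (by simp_all [pvN1, pvN2, pvN3, pvN4, pvN5, pvN6, pvNaN, pvInf, List.cons_prefix_cons, List.isPrefixOf_iff_prefix] <;> first | assumption | (intro h; subst h; simp_all) | skip) (by simp_all [pvN1, pvN2, pvN3, pvN4, pvN5, pvN6, pvNaN, pvInf, List.cons_prefix_cons, List.isPrefixOf_iff_prefix] <;> first | assumption | (intro h; subst h; simp_all) | skip),
                    pvRA_eq_sanB (' ' :: '-' :: w)]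
                  conv_rhs => rw [sanB]
                  simp_all [pvNaN, pvInf, List.cons_prefix_cons, List.isPrefixOf_iff_prefix]
                  all_goals split_ifs <;> simp_all
              · by_cases hI : pvInf.isPrefixOf (e :: w)
                · obtain ⟨v, hv⟩ := List.isPrefixOf_iff_prefix.mp hI
                  rw [show pvInf ++ v = 'I' :: 'n' :: 'f' :: 'i' :: 'n' :: 'i' :: 't' :: 'y' :: v from rfl] at hv
                  injection hv with h1 h2
                  subst h1; subst h2
                  have hA : pvRA (':' :: ' ' :: 'I' :: 'n' :: 'f' :: 'i' :: 'n' :: 'i' :: 't' :: 'y' :: v) = pvRS ++ pvRA v := pvRA_m3 v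
                  rw [hA, pvRA_eq_sanB v]
                  conv_rhs => rw [sanB]
                  simp [pvNaN, pvInf, pvRS]
                · rw [pvRA_cons_colon (' ' :: e :: w)
                    (by simp_all [pvN1, pvN2, pvN3, pvN4, pvN5, pvN6, pvNaN, pvInf, List.cons_prefix_cons, List.isPrefixOf_iff_prefix] <;> first | assumption | (intro h; subst h; simp_all) | skip) (by simp_all [pvN1, pvN2, pvN3, pvN4, pvN5, pvN6, pvNaN, pvInf, List.cons_prefix_cons, List.isPrefixOf_iff_prefix] <;> first | assumption | (intro h; subst h; simp_all) | skip) (by simp_all [pvN1, pvN2, pvN3, pvN4, pvN5, pvN6, pvNaN, pvInf, List.cons_prefix_cons, List.isPrefixOf_iff_prefix] <;> first | assumption | (intro h; subst h; simp_all) | skip) (by simp_all [pvN1, pvN2, pvN3, pvN4, pvN5, pvN6, pvNaN, pvInf, List.cons_prefix_cons, List.isPrefixOf_iff_prefix] <;> first | assumption | (intro h; subst h; simp_all) | skip) (by simp_all [pvN1, pvN2, pvN3, pvN4, pvN5, pvN6, pvNaN, pvInf, List.cons_prefix_cons, List.isPrefixOf_iff_prefix] <;> first | assumption | (intro h; subst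 h; simp_all) | skip) (by simp_all [pvN1, pvN2, pvN3, pvN4, pvN5, pvN6, pvNaN, pvInf, List.cons_prefix_cons, List.isPrefixOf_iff_prefix] <;> first | assumption | (intro h; subst h; simp_all) | skip),
                    pvRA_eq_sanB (' ' :: e :: w)]
                  conv_rhs => rw [sanB]
                  simp_all [pvNaN, pvInf, List.cons_prefix_cons, List.isPrefixOf_iff_prefix]
                  all_goals split_ifs <;> simp_all
        · by_cases hN : pvNaN.isPrefixOf (d :: u)
          · obtain ⟨v, hv⟩ := List.isPrefixOf_iff_prefix.mp hN
            rw [show pvNaN ++ v = 'N' :: 'a' :: 'N' :: v from rfl] at hv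
            injection hv with h1 h2
            subst h1; subst h2
            have hA : pvRA (':' :: 'N' :: 'a' :: 'N' :: v) = pvR0 ++ pvRA v := pvRA_m2 v
            rw [hA, pvRA_eq_sanB v]
            conv_rhs => rw [sanB]
            simp [pvNaN, pvR0]
          · by_cases hd2 : d = '-'
            · subst hd2
              by_cases hI : pvInf.isPrefixOf u
              · obtain ⟨v, hv⟩ := List.isPrefixOf_iff_prefix.mp hI
                subst hv
                have hA : pvRA (':' :: '-' :: (pvInf ++ v)) = pvR0 ++ pvRA v := pvRA_m5 v
                rw [hA, pvRA_eq_sanB v]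
                conv_rhs => rw [sanB]
                simp [pvNaN, pvInf, pvR0, List.isPrefixOf_iff_prefix]
              · rw [pvRA_cons_colon ('-' :: u)
                  (by simp_all [pvN1, pvN2, pvN3, pvN4, pvN5, pvN6, pvNaN, pvInf, List.cons_prefix_cons, List.isPrefixOf_iff_prefix] <;> first | assumption | (intro h; subst h; simp_all) | skip) (by simp_all [pvN1, pvN2, pvN3, pvN4, pvN5, pvN6, pvNaN, pvInf, List.cons_prefix_cons, List.isPrefixOf_iff_prefix] <;> first | assumption | (intro h; subst h; simp_all) | skip) (by simp_all [pvN1, pvN2, pvN3, pvN4, pvN5, pvN6, pvNaN, pvInf, List.cons_prefix_cons, List.isPrefixOf_iff_prefix] <;> first | assumption | (intro h; subst h; simp_all) | skip) (by simp_all [pvN1, pvN2, pvN3, pvN4, pvN5, pvN6, pvNaN, pvInf, List.cons_prefix_cons, List.isPrefixOf_iff_prefix] <;> first | assumption | (intro h; subst h; simp_all) | skip) (by simp_all [pvN1, pvN2, pvN3, pvN4, pvN5, pvN6, pvNaN, pvInf, List.cons_prefix_cons, List.isPrefixOf_iff_prefix] <;> first | assumption | (intro h; subst h; simp_all) | skip)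 (by simp_all [pvN1, pvN2, pvN3, pvN4, pvN5, pvN6, pvNaN, pvInf, List.cons_prefix_cons, List.isPrefixOf_iff_prefix] <;> first | assumption | (intro h; subst h; simp_all) | skip),
                  pvRA_eq_sanB ('-' :: u)]
                conv_rhs => rw [sanB]
                simp_all [pvNaN, pvInf, List.cons_prefix_cons, List.isPrefixOf_iff_prefix]
                all_goals split_ifs <;> simp_all
            · by_cases hI : pvInf.isPrefixOf (d :: u)
              · obtain ⟨v, hv⟩ := List.isPrefixOf_iff_prefix.mp hI
                rw [show pvInf ++ v = 'I' :: 'n' :: 'f' :: 'i' :: 'n' :: 'i' :: 't' :: 'y' :: v from rfl] at hv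
                injection hv with h1 h2
                subst h1; subst h2
                have hA : pvRA (':' :: 'I' :: 'n' :: 'f' :: 'i' :: 'n' :: 'i' :: 't' :: 'y' :: v) = pvR0 ++ pvRA v := pvRA_m4 v
                rw [hA, pvRA_eq_sanB v]
                conv_rhs => rw [sanB]
                simp [pvNaN, pvInf, pvR0]
              · rw [pvRA_cons_colon (d :: u)
                  (by simp_all [pvN1, pvN2, pvN3, pvN4, pvN5, pvN6, pvNaN, pvInf, List.cons_prefix_cons, List.isPrefixOf_iff_prefix] <;> first | assumption | (intro h; subst h; simp_all) | skip) (by simp_all [pvN1, pvN2, pvN3, pvN4, pvN5, pvN6, pvNaN, pvInf, List.cons_prefix_cons, List.isPrefixOf_iff_prefix] <;> first | assumption | (intro h; subst h; simp_all) | skip) (by simp_all [pvN1, pvN2, pvN3, pvN4, pvN5, pvN6, pvNaN, pvInf, List.cons_prefix_cons, List.isPrefixOf_iff_prefix] <;> first | assumption | (intro h; subst h; simp_all) | skip) (by simp_all [pvN1, pvN2, pvN3, pvN4, pvN5, pvN6, pvNaN, pvInf, List.cons_prefix_cons, List.isPrefixOf_iff_prefix] <;> first | assumption | (intro h; subst h;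 simp_all) | skip) (by simp_all [pvN1, pvN2, pvN3, pvN4, pvN5, pvN6, pvNaN, pvInf, List.cons_prefix_cons, List.isPrefixOf_iff_prefix] <;> first | assumption | (intro h; subst h; simp_all) | skip) (by simp_all [pvN1, pvN2, pvN3, pvN4, pvN5, pvN6, pvNaN, pvInf, List.cons_prefix_cons, List.isPrefixOf_iff_prefix] <;> first | assumption | (intro h; subst h; simp_all) | skip),
                  pvRA_eq_sanB (d :: u)]
                conv_rhs => rw [sanB]
                simp_all [pvNaN, pvInf, List.cons_prefix_cons, List.isPrefixOf_iff_prefix]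
                all_goals split_ifs <;> simp_all
    · rw [pvRA_cons_ne c t hc, pvRA_eq_sanB t]
      conv_rhs => rw [sanB]
      rw [if_neg hc]
termination_by cs => cs.length
decreasing_by all_goals first
  | (simp [pvNaN, pvInf] <;> omega)
  | (rw [← hv]; simp [pvNaN, pvInf] <;> omega)

-- ===== VERDICT (by name: the statement is the Claim_ definition above) =====
theorem sanitize_json_line_spec : Claim_equal_sanitize_json_line := by
  intro line _
  unfold Spec_sanitize_json_line sanitize_json_line_alt
  have h := (A_eq_pvRA line).trans (pvRA_eq_sanB line.toList)
  exact String.toList_inj.mp (h.trans String.toList_ofList.symm)
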